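-- pv_equiv track=rewrite | github.com/peiwenhsieh-gif/EOF-Script-blind-test-dashboard | scripts/rebuild_dashboard_data.py | build_open_response_data
-- ===== SOURCE A (Python) =====
-- from typing import Any
--
-- def tidy_text(value: Any) -> str:
--     return str(value or "").replace("\r\n", "\n").replace("\r", "\n").strip()
--
-- def build_open_response_data(respondents: list[dict[str, Any]]) -> dict[str, list[str]]:
--     field_map = {
--         "villain": "villainResponse",
--         "expected": "expectedResponse",
--         "boring": "boringResponse",
--         "logline": "logline",
--     }
--     output: dict[str, list[str]] = {}
--     for key, field in field_map.items():
--         output[key] = [tidy_text(row.get(field)) for row in respondents if tidy_text(row.get(field))]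
--     return output
-- ===== SOURCE B (Python) =====
-- from typing import Any
--
--
-- def tidy_text(value: Any) -> str:
--     return str(value or "").replace("\r\n", "\n").replace("\r", "\n").strip()
--
--
-- def build_open_response_data(respondents: list[dict[str, Any]]) -> dict[str, list[str]]:
--     villain: list[str] = []
--     expected: list[str] = []
--     boring: list[str] = []
--     logline: list[str] = []
--     for row in respondents:
--         t = tidy_text(row.get("villainResponse"))
--         if t:
--             villain.append(t)
--         t = tidy_text(row.get("expectedResponse"))
--         if t:
--             expected.append(t)
--         t = tidy_text(row.get("boringResponse"))
--         if t:
--             boring.append(t)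
--         t = tidy_text(row.get("logline"))
--         if t:
--             logline.append(t)
--     return {
--         "villain": villain,
--         "expected": expected,
--         "boring": boring,
--         "logline": logline,
--     }
-- ===== Notes on version B (the rewrite author's own statement) =====
-- stated objective: alternative
-- what changed: Replaces A's four field-outer comprehension scans (each calling tidy_text twice per row) with one respondent-outer pass that computes each tidied cell once and appends it to per-category accumulator lists.
import Mathlib
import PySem

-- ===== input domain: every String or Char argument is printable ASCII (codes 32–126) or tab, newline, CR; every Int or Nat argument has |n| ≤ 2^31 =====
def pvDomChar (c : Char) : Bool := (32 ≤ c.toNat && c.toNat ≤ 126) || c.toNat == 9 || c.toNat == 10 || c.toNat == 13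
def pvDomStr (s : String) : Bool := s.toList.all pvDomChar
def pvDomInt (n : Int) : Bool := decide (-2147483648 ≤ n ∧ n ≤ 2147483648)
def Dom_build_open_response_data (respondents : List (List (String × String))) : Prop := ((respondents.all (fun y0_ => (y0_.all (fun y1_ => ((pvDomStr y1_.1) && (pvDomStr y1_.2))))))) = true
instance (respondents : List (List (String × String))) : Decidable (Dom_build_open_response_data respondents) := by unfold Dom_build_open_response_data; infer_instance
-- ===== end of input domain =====

-- B replaces A's four field-outer comprehension scans (two tidy_text calls per cell) with one
-- respondent-outer pass computing each tidied cell once into four accumulator lists (objective: alternative).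


-- shared helper: tidy_text(value) = str(value or "").replace("\r\n","\n").replace("\r","\n").strip()
-- (value is an Optional string cell; 'value or ""' is value.getD "" since str is identity on strings
-- and the empty string maps to itself)
def pvTidy (v : Option String) : String :=
  PySem.Str.strip (PySem.Str.replace (PySem.Str.replace (v.getD "") "\r\n" "\n") "\r" "\n")

-- ===== PORT A =====
-- field-outer loop: for each (key, field) the comprehension
-- [tidy_text(row.get(field)) for row in respondents if tidy_text(row.get(field))]
def build_open_response_data (respondents : List (List (String × String))) : List (String × List String) :=
  let field_map : List (String × String) :=
    [("villain", "villainResponse"), ("expected", "expectedResponse"),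
     ("boring", "boringResponse"), ("logline", "logline")]
  (field_map.foldl (fun (output : PySem.Dict String (List String)) kf =>
      output.insert kf.1
        ((respondents.filter (fun row => pvTidy ((PySem.Dict.mk row).get? kf.2) ≠ "")).map
          (fun row => pvTidy ((PySem.Dict.mk row).get? kf.2))))
    (PySem.Dict.mk [])).items

-- ===== PORT B =====
-- single respondent-outer pass (the loop body of Source B), each tidied cell computed once,
-- four accumulator lists carried as a 4-tuple
def pvStep (st : List String × List String × List String × List String)
    (row : List (String × String)) :
    List String × List String × List String × List String :=
  let t1 := pvTidy ((PySem.Dict.mk row).get? "villainResponse")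
  let villain := if t1 ≠ "" then st.1 ++ [t1] else st.1
  let t2 := pvTidy ((PySem.Dict.mk row).get? "expectedResponse")
  let expected := if t2 ≠ "" then st.2.1 ++ [t2] else st.2.1
  let t3 := pvTidy ((PySem.Dict.mk row).get? "boringResponse")
  let boring := if t3 ≠ "" then st.2.2.1 ++ [t3] else st.2.2.1
  let t4 := pvTidy ((PySem.Dict.mk row).get? "logline")
  let logline := if t4 ≠ "" then st.2.2.2 ++ [t4] else st.2.2.2
  (villain, expected, boring, logline)

def build_open_response_data_alt (respondents : List (List (String × String))) : List (String × List String) :=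
  let st := respondents.foldl pvStep ([], [], [], [])
  [("villain", st.1), ("expected", st.2.1), ("boring", st.2.2.1), ("logline", st.2.2.2)]

-- ===== PRECONDITION & SPEC =====
def Spec_build_open_response_data (respondents : List (List (String × String))) (out : List (String × List String)) : Prop := out = build_open_response_data_alt respondents
instance (respondents : List (List (String × String))) (out : List (String × List String)) : Decidable (Spec_build_open_response_data respondents out) := by unfold Spec_build_open_response_data; infer_instance

-- ===== CLAIM (what is proved, stated in full; the proofs are below) =====
def Claim_equal_build_open_response_data : Prop := ∀ (respondents : List (List (String × String))), Dom_build_open_response_data respondents → Spec_build_open_response_data respondents (build_open_response_data respondents)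

-- ===== LEMMAS AND PROOFS =====

-- shorthand for the filtered-and-tidied column A computes for one field
def pvCol (respondents : List (List (String × String))) (field : String) : List String :=
  (respondents.filter (fun row => pvTidy ((PySem.Dict.mk row).get? field) ≠ "")).map
    (fun row => pvTidy ((PySem.Dict.mk row).get? field))

-- loop invariant of B's single pass
theorem pv_fold_inv (respondents : List (List (String × String)))
    (a b c d : List String) :
    respondents.foldl pvStep (a, b, c, d)
    = (a ++ pvCol respondents "villainResponse",
       b ++ pvCol respondents "expectedResponse",
       c ++ pvCol respondents "boringResponse",
       d ++ pvCol respondents "logline") := by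
  induction respondents generalizing a b c d with
  | nil => simp [pvCol]
  | cons row rest ih =>
    simp only [List.foldl_cons]
    rw [ih]
    simp only [pvStep, pvCol, List.filter_cons, decide_eq_true_eq]
    split_ifs <;> simp [List.append_assoc]

theorem build_open_response_data_spec : Claim_equal_build_open_response_data := by
  intro respondents _
  unfold Spec_build_open_response_data build_open_response_data build_open_response_data_alt
  rw [pv_fold_inv]
  simp [List.foldl, PySem.Dict.insert, pvCol]
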